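-- pv_equiv track=rewrite | github.com/powerbauer1337/mpreverse | scripts/reverse_engineering_analysis.py | _parse_aapt_output
-- ===== SOURCE A (Python) =====
-- from typing import Dict, List, Optional, Any, Tuple
--
-- def _parse_aapt_output(output: str) -> Dict[str, Any]:
--     """Parse aapt output to extract metadata."""
--     metadata = {'file_type': 'APK'}
--
--     for line in output.split('\n'):
--         if line.startswith('package:'):
--             # Extract package name and version
--             parts = line.split()
--             for part in parts:
--                 if part.startswith('name='):
--                     metadata['package_name'] = part.split('=')[1].strip("'")
--                 elif part.startswith('versionName='):
--                     metadata['version_name'] = part.split('=')[1].strip("'")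
--                 elif part.startswith('versionCode='):
--                     metadata['version_code'] = part.split('=')[1].strip("'")
--
--     return metadata
-- ===== SOURCE B (Python) =====
-- import re
--
-- _FIELD_RE = re.compile(r"(?<!\S)(versionName|versionCode|name)=([^\s=]*)")
-- _KEYMAP = {'name': 'package_name', 'versionName': 'version_name', 'versionCode': 'version_code'}
--
-- def _parse_aapt_output(output: str):
--     """Parse aapt output to extract metadata (regex scan instead of token loop)."""
--     metadata = {'file_type': 'APK'}
--     for line in output.split('\n'):
--         if line.startswith('package:'):
--             for m in _FIELD_RE.finditer(line):
--                 metadata[_KEYMAP[m.group(1)]] = m.group(2).strip("'")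
--     return metadata
-- ===== Notes on version B (the rewrite author's own statement) =====
-- stated objective: idiomatic
-- what changed: B replaces A's whitespace-tokenize-then-prefix-test inner loop with a single compiled-regex scan (re.finditer with a token-boundary lookbehind) over each package: line, mapping matched field names through a table.
import Mathlib
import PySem

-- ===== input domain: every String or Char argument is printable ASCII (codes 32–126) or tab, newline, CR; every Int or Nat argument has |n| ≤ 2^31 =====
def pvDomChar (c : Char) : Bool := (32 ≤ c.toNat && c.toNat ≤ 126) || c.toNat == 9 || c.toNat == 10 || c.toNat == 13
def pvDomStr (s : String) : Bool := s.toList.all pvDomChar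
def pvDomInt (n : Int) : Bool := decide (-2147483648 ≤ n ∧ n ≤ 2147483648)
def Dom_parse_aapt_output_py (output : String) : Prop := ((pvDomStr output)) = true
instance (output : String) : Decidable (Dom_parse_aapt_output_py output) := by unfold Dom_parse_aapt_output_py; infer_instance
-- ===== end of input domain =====

-- B parses each 'package:' line with one regex-style boundary scan (ported by hand as a char scanner)
-- instead of A's whitespace-tokenize-then-prefix-test inner loop; same return value, idiomatic objective.


-- ===== PORT A =====
-- one token of line.split(): the if/elif chain of A's inner loop ('part.split('=')[1]' is total here:
-- each taken branch guarantees an '=' in the token, so getD 1 [] is exact)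
def pvStepA (d : PySem.Dict String String) (part : List Char) : PySem.Dict String String :=
  if PySem.Chars.startswith part ("name=".toList) then
    d.insert "package_name" (String.mk (PySem.Chars.stripChars ((PySem.Chars.splitOn part ['=']).getD 1 []) ['\'']))
  else if PySem.Chars.startswith part ("versionName=".toList) then
    d.insert "version_name" (String.mk (PySem.Chars.stripChars ((PySem.Chars.splitOn part ['=']).getD 1 []) ['\'']))
  else if PySem.Chars.startswith part ("versionCode=".toList) then
    d.insert "version_code" (String.mk (PySem.Chars.stripChars ((PySem.Chars.splitOn part ['=']).getD 1 []) ['\'']))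
  else d

-- one line of output.split('\n')
def pvLineA (d : PySem.Dict String String) (line : List Char) : PySem.Dict String String :=
  if PySem.Chars.startswith line ("package:".toList) then
    (PySem.Chars.split₀ line).foldl pvStepA d
  else d

def parse_aapt_output_py (output : String) : List (String × String) :=
  ((PySem.Chars.splitOn output.toList ['\n']).foldl pvLineA
    (PySem.Dict.mk [("file_type", "APK")])).items

-- ===== PORT B =====
-- Source B's regex r"(?<!\S)(versionName|versionCode|name)=([^\s=]*)" has no PySem primitive, so finditer is
-- ported by hand, step for step, as a left-to-right character scan: `bound` is the (?<!\S) token boundary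
-- (start of line or previous char whitespace; after a match the previous char is never whitespace),
-- the alternation is tried in the regex's order, and the captured value is [^\s=]* (pvVal).
-- Exact within the ASCII domain (where regex \s = PySem.Chars.isspace).
def pvVal (cs : List Char) : List Char :=
  cs.takeWhile (fun x => !PySem.Chars.isspace x && x != '=')

def pvScan : List Char → Bool → PySem.Dict String String → PySem.Dict String String
  | [], _, d => d
  | c :: cs, bound, d =>
    if PySem.Chars.isspace c then pvScan cs true d
    else if bound && PySem.Chars.startswith (c :: cs) ("versionName=".toList) then
      let v := pvVal ((c :: cs).drop 12)
      pvScan ((c :: cs).drop (12 + v.length)) false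
        (d.insert "version_name" (String.mk (PySem.Chars.stripChars v ['\''])))
    else if bound && PySem.Chars.startswith (c :: cs) ("versionCode=".toList) then
      let v := pvVal ((c :: cs).drop 12)
      pvScan ((c :: cs).drop (12 + v.length)) false
        (d.insert "version_code" (String.mk (PySem.Chars.stripChars v ['\''])))
    else if bound && PySem.Chars.startswith (c :: cs) ("name=".toList) then
      let v := pvVal ((c :: cs).drop 5)
      pvScan ((c :: cs).drop (5 + v.length)) false
        (d.insert "package_name" (String.mk (PySem.Chars.stripChars v ['\''])))
    else pvScan cs false d
  termination_by s _ _ => s.length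
  decreasing_by all_goals simp [List.length_drop] <;> omega

def pvLineB (d : PySem.Dict String String) (line : List Char) : PySem.Dict String String :=
  if PySem.Chars.startswith line ("package:".toList) then pvScan line true d else d

def parse_aapt_output_py_alt (output : String) : List (String × String) :=
  ((PySem.Chars.splitOn output.toList ['\n']).foldl pvLineB
    (PySem.Dict.mk [("file_type", "APK")])).items

-- ===== PRECONDITION & SPEC =====
def Spec_parse_aapt_output_py (output : String) (out : List (String × String)) : Prop := out = parse_aapt_output_py_alt output
instance (output : String) (out : List (String × String)) : Decidable (Spec_parse_aapt_output_py output out) := by unfold Spec_parse_aapt_output_py; infer_instance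

-- ===== CLAIM (what is proved, stated in full; the proofs are below) =====
def Claim_equal_parse_aapt_output_py : Prop := ∀ (output : String), Dom_parse_aapt_output_py output → Spec_parse_aapt_output_py output (parse_aapt_output_py output)

-- ===== LEMMAS AND PROOFS =====

-- the words of s (what str.split() returns), as a plain structural recursion
def pvWords : List Char → List (List Char)
  | [] => []
  | c :: cs =>
    if PySem.Chars.isspace c then pvWords cs
    else (c :: cs.takeWhile (fun x => !PySem.Chars.isspace x)) ::
         pvWords (cs.dropWhile (fun x => !PySem.Chars.isspace x))
  termination_by s => s.length
  decreasing_by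
    · simp
    · simp; exact List.length_dropWhile_le _ _

theorem pvWords_all (l : List Char) (h : l.all (fun x => !PySem.Chars.isspace x)) :
    pvWords l = if l.isEmpty then [] else [l] := by
  cases l with
  | nil => simp [pvWords]
  | cons c cs =>
    rw [List.all_cons, Bool.and_eq_true] at h
    have h1 : PySem.Chars.isspace c = false := by simpa using h.1
    have ht : List.takeWhile (fun x => !PySem.Chars.isspace x) cs = cs :=
      List.takeWhile_eq_self_iff.mpr (fun a ha => List.all_eq_true.mp h.2 a ha)
    have hd : List.dropWhile (fun x => !PySem.Chars.isspace x) cs = [] :=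
      List.dropWhile_eq_nil_iff.mpr (fun a ha => List.all_eq_true.mp h.2 a ha)
    rw [pvWords, if_neg (by simp [h1]), ht, hd]
    simp [pvWords]

theorem pvWords_append_space (l : List Char) (c : Char) (rest : List Char)
    (hl : l ≠ []) (hall : l.all (fun x => !PySem.Chars.isspace x))
    (hc : PySem.Chars.isspace c = true) :
    pvWords (l ++ c :: rest) = l :: pvWords rest := by
  cases l with
  | nil => exact absurd rfl hl
  | cons h t =>
    rw [List.all_cons, Bool.and_eq_true] at hall
    have h1 : PySem.Chars.isspace h = false := by simpa using hall.1
    have ht : List.takeWhile (fun x => !PySem.Chars.isspace x) t = t :=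
      List.takeWhile_eq_self_iff.mpr (fun a ha => List.all_eq_true.mp hall.2 a ha)
    have hd : List.dropWhile (fun x => !PySem.Chars.isspace x) t = [] :=
      List.dropWhile_eq_nil_iff.mpr (fun a ha => List.all_eq_true.mp hall.2 a ha)
    rw [List.cons_append, pvWords, if_neg (by simp [h1])]
    rw [List.takeWhile_append, List.dropWhile_append, ht, hd]
    rw [List.takeWhile_cons_of_neg (by simp [hc]), List.dropWhile_cons_of_neg (by simp [hc])]
    simp only [List.isEmpty_nil, if_pos, List.append_nil]
    rw [pvWords, if_pos hc]

theorem pvGo_spec (s : List Char) : ∀ (cur : List Char) (acc : List (List Char)),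
    cur.all (fun x => !PySem.Chars.isspace x) →
    PySem.Chars.split₀.go s cur acc = acc.reverse ++ pvWords (cur.reverse ++ s) := by
  induction s with
  | nil =>
    intro cur acc hcur
    rw [PySem.Chars.split₀.go, List.append_nil, pvWords_all _ (by simpa using hcur)]
    cases cur with
    | nil => simp
    | cons x xs => simp
  | cons c rest ih =>
    intro cur acc hcur
    rw [PySem.Chars.split₀.go]
    by_cases hc : PySem.Chars.isspace c = true
    · rw [if_pos hc]
      cases cur with
      | nil =>
        rw [List.isEmpty_nil, if_pos rfl, ih [] acc (by simp)]
        simp [pvWords, hc]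
      | cons x xs =>
        rw [List.isEmpty_cons, if_neg (by simp), ih [] ((x :: xs).reverse :: acc) (by simp)]
        rw [pvWords_append_space (x :: xs).reverse c rest (by simp) (by rw [List.all_reverse]; exact hcur) hc]
        simp
    · rw [if_neg hc, ih (c :: cur) acc (by simp [List.all_cons, hcur]; simpa using hc)]
      simp [List.append_assoc]

theorem pvWords_eq_split₀ (s : List Char) : PySem.Chars.split₀ s = pvWords s := by
  rw [PySem.Chars.split₀, pvGo_spec s [] [] (by simp)]
  simp

-- ---- generic list facts ----
theorem pvTakeWhile_congr {f g : Char → Bool} (l : List Char) (h : ∀ x ∈ l, f x = g x) :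
    l.takeWhile f = l.takeWhile g := by
  induction l with
  | nil => rfl
  | cons a as ih =>
    rw [List.takeWhile_cons, List.takeWhile_cons, h a (by simp)]
    by_cases hg : g a = true
    · rw [if_pos hg, if_pos hg, ih (fun x hx => h x (by simp [hx]))]
    · rw [if_neg hg, if_neg hg]

theorem pvDropWhile_head {p : Char → Bool} (s : List Char) (c : Char) (tl : List Char)
    (h : s.dropWhile p = c :: tl) : p c = false := by
  induction s with
  | nil => simp at h
  | cons a as ih =>
    by_cases hp : p a = true
    · rw [List.dropWhile_cons_of_pos hp] at h; exact ih h
    · rw [List.dropWhile_cons_of_neg (by simp [Bool.not_eq_true] at hp ⊢; exact hp)] at h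
      cases h; simpa using hp

theorem pvDropWhile_idem {p : Char → Bool} (s : List Char) :
    (s.dropWhile p).dropWhile p = s.dropWhile p := by
  cases h : s.dropWhile p with
  | nil => rfl
  | cons c tl =>
    rw [List.dropWhile_cons_of_neg]
    simp [pvDropWhile_head s c tl h]

theorem pvPrefix_takeWhile {p : Char → Bool} (key : List Char) :
    ∀ (s : List Char), key.all p → key <+: s → key <+: s.takeWhile p := by
  induction key with
  | nil => intro s _ _; exact List.nil_prefix
  | cons k ks ih =>
    intro s hall hpre
    cases s with
    | nil => exact absurd (List.prefix_nil.mp hpre) (by simp)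
    | cons b s' =>
      rw [List.cons_prefix_cons] at hpre
      obtain ⟨rfl, hks⟩ := hpre
      rw [List.all_cons, Bool.and_eq_true] at hall
      rw [List.takeWhile_cons_of_pos hall.1, List.cons_prefix_cons]
      exact ⟨rfl, ih s' hall.2 hks⟩

theorem pvStart_false (tk k : List Char) (h : ¬ k <+: tk) :
    PySem.Chars.startswith tk k = false := by
  cases hx : PySem.Chars.startswith tk k with
  | false => rfl
  | true => exact absurd ((PySem.Chars.startswith_iff _ _).mp hx) h

-- ---- part.split('=')[1] on a token that starts with key= ----
theorem pvGoSplit_walk (key : List Char) :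
    ∀ (fuel : ℕ) (l cur : List Char) (acc : List (List Char)), '=' ∉ key →
    PySem.Chars.splitOn.go ['='] (fuel + key.length + 1) (key ++ '=' :: l) cur acc =
      PySem.Chars.splitOn.go ['='] fuel l [] ((key.reverse ++ cur).reverse :: acc) := by
  induction key with
  | nil =>
    intro fuel l cur acc _
    rw [List.nil_append, PySem.Chars.splitOn.go]
    simp [List.isPrefixOf]
  | cons k ks ih =>
    intro fuel l cur acc hne
    rw [List.mem_cons, not_or] at hne
    have : fuel + (k :: ks).length + 1 = (fuel + ks.length + 1) + 1 := by simp; omega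
    rw [this, List.cons_append, PySem.Chars.splitOn.go]
    rw [if_neg (by simp [List.isPrefixOf]; intro h; exact hne.1 h)]
    rw [ih fuel l (k :: cur) acc hne.2]
    simp

theorem pvGoSplit_first (l : List Char) :
    ∀ (fuel : ℕ) (cur : List Char) (acc : List (List Char)), l.length < fuel →
    ∃ t, PySem.Chars.splitOn.go ['='] fuel l cur acc =
      acc.reverse ++ (cur.reverse ++ l.takeWhile (fun x => x != '=')) :: t := by
  induction l with
  | nil =>
    intro fuel cur acc hf
    obtain ⟨f, rfl⟩ := Nat.exists_eq_succ_of_ne_zero (by omega : fuel ≠ 0)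
    refine ⟨[], ?_⟩
    rw [PySem.Chars.splitOn.go]
    simp
    omega
  | cons c r ih =>
    intro fuel cur acc hf
    obtain ⟨f, rfl⟩ := Nat.exists_eq_succ_of_ne_zero (by omega : fuel ≠ 0)
    by_cases hc : c = '='
    · subst hc
      rw [PySem.Chars.splitOn.go, if_pos (by simp [List.isPrefixOf])]
      obtain ⟨t', ht'⟩ := ih f [] (cur.reverse :: acc) (by simpa using hf)
      refine ⟨r.takeWhile (fun x => x != '=') :: t', ?_⟩
      have hd : List.drop (['='] : List Char).length ('=' :: r) = r := by simp
      rw [hd, ht', List.takeWhile_cons_of_neg (by simp)]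
      simp
    · rw [PySem.Chars.splitOn.go, if_neg (by simp [List.isPrefixOf]; intro h; exact hc h.symm)]
      obtain ⟨t', ht'⟩ := ih f (c :: cur) acc (by simpa using hf)
      refine ⟨t', ?_⟩
      rw [ht', List.takeWhile_cons_of_pos (by simp [hc])]
      simp

theorem pvSplit1 (key rest : List Char) (hk : '=' ∉ key) :
    (PySem.Chars.splitOn (key ++ '=' :: rest) ['=']).getD 1 [] =
      rest.takeWhile (fun x => x != '=') := by
  rw [PySem.Chars.splitOn]
  have hlen : (key ++ '=' :: rest).length + 1 = (rest.length + 1) + key.length + 1 := by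
    simp; omega
  rw [hlen, pvGoSplit_walk key (rest.length + 1) rest [] [] hk]
  obtain ⟨t, ht⟩ := pvGoSplit_first rest (rest.length + 1) [] [(key.reverse ++ []).reverse]
    (by omega)
  rw [ht]
  simp

-- ---- the value and the rest of the scan, against the token structure ----
theorem pvVal_eq (s : List Char) (k : ℕ)
    (hk : k ≤ (s.takeWhile (fun x => !PySem.Chars.isspace x)).length) :
    pvVal (s.drop k) =
      ((s.takeWhile (fun x => !PySem.Chars.isspace x)).drop k).takeWhile (fun x => x != '=') := by
  have hsplit : s = s.takeWhile (fun x => !PySem.Chars.isspace x) ++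
      s.dropWhile (fun x => !PySem.Chars.isspace x) := (List.takeWhile_append_dropWhile).symm
  have hcongr : ((s.takeWhile (fun x => !PySem.Chars.isspace x)).drop k).takeWhile
      (fun x => !PySem.Chars.isspace x && x != '=') =
      ((s.takeWhile (fun x => !PySem.Chars.isspace x)).drop k).takeWhile (fun x => x != '=') := by
    refine pvTakeWhile_congr _ (fun x hx => ?_)
    have hx1 : x ∈ List.takeWhile (fun y => !PySem.Chars.isspace y) s :=
      List.mem_of_mem_drop hx
    have hp := List.mem_takeWhile_imp hx1
    simp only [hp]
    simp
  have hr : (s.dropWhile (fun x => !PySem.Chars.isspace x)).takeWhile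
      (fun x => !PySem.Chars.isspace x && x != '=') = [] := by
    cases hrr : s.dropWhile (fun x => !PySem.Chars.isspace x) with
    | nil => rfl
    | cons c tl =>
      rw [List.takeWhile_cons_of_neg]
      simp [pvDropWhile_head s c tl hrr]
  rw [pvVal]
  conv_lhs => rw [hsplit, List.drop_append_of_le_length hk]
  rw [List.takeWhile_append]
  by_cases hcond : ((((s.takeWhile (fun x => !PySem.Chars.isspace x)).drop k).takeWhile
      (fun x => !PySem.Chars.isspace x && x != '=')).length =
      ((s.takeWhile (fun x => !PySem.Chars.isspace x)).drop k).length)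
  · rw [if_pos hcond, hr, List.append_nil]
    have := List.IsPrefix.eq_of_length (List.takeWhile_prefix _) hcond
    rw [← hcongr, this]
  · rw [if_neg hcond, hcongr]

theorem pvRest_eq (s : List Char) (k : ℕ)
    (hk : k ≤ (s.takeWhile (fun x => !PySem.Chars.isspace x)).length) :
    (s.drop (k + (pvVal (s.drop k)).length)).dropWhile (fun x => !PySem.Chars.isspace x) =
      s.dropWhile (fun x => !PySem.Chars.isspace x) := by
  have hsplit : s = s.takeWhile (fun x => !PySem.Chars.isspace x) ++
      s.dropWhile (fun x => !PySem.Chars.isspace x) := (List.takeWhile_append_dropWhile).symm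
  have hvp : pvVal (s.drop k) <+: (s.takeWhile (fun x => !PySem.Chars.isspace x)).drop k := by
    rw [pvVal_eq s k hk]; exact List.takeWhile_prefix _
  have hvlen : (pvVal (s.drop k)).length ≤
      ((s.takeWhile (fun x => !PySem.Chars.isspace x)).drop k).length := hvp.length_le
  have h1 : s.drop k = (s.takeWhile (fun x => !PySem.Chars.isspace x)).drop k ++
      s.dropWhile (fun x => !PySem.Chars.isspace x) := by
    conv_lhs => rw [hsplit]
    exact List.drop_append_of_le_length hk
  set n := (pvVal (s.drop k)).length with hn
  have h2 : s.drop (k + n) =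
      ((s.takeWhile (fun x => !PySem.Chars.isspace x)).drop k).drop n ++
      s.dropWhile (fun x => !PySem.Chars.isspace x) := by
    rw [← List.drop_drop, h1]
    exact List.drop_append_of_le_length hvlen
  rw [h2, List.dropWhile_append, if_pos]
  · exact pvDropWhile_idem s
  · rw [List.isEmpty_iff, List.dropWhile_eq_nil_iff]
    intro x hx
    have hx1 : x ∈ List.takeWhile (fun y => !PySem.Chars.isspace y) s :=
      List.mem_of_mem_drop (List.mem_of_mem_drop hx)
    simpa using List.mem_takeWhile_imp hx1

-- ---- the scanner against the word list ----
theorem pvScan_false (s : List Char) : ∀ (d : PySem.Dict String String),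
    pvScan s false d = pvScan (s.dropWhile (fun x => !PySem.Chars.isspace x)) true d := by
  induction s with
  | nil => intro d; simp [pvScan]
  | cons c cs ih =>
    intro d
    rw [pvScan]
    by_cases hc : PySem.Chars.isspace c = true
    · rw [if_pos hc, List.dropWhile_cons_of_neg (by simp [hc])]
      rw [pvScan, if_pos hc]
    · simp only [if_neg hc, Bool.false_and, Bool.false_eq_true, if_false]
      rw [List.dropWhile_cons_of_pos (by simp [hc])]
      exact ih d

theorem pvStart_token_false (k : List Char) (c : Char) (cs : List Char)
    (h : ¬ PySem.Chars.startswith (c :: cs) k = true) :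
    PySem.Chars.startswith ((c :: cs).takeWhile (fun x => !PySem.Chars.isspace x)) k = false := by
  apply pvStart_false
  intro hkt
  exact h ((PySem.Chars.startswith_iff _ _).mpr (hkt.trans (List.takeWhile_prefix _)))

theorem pvStart_token_true (k : List Char) (c : Char) (cs : List Char)
    (hkall : k.all (fun x => !PySem.Chars.isspace x))
    (h : PySem.Chars.startswith (c :: cs) k = true) :
    PySem.Chars.startswith ((c :: cs).takeWhile (fun x => !PySem.Chars.isspace x)) k = true :=
  (PySem.Chars.startswith_iff _ _).mpr
    (pvPrefix_takeWhile k (c :: cs) hkall ((PySem.Chars.startswith_iff _ _).mp h))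

theorem pvVal_token (key : List Char) (c : Char) (cs : List Char)
    (hkeq : '=' ∉ key)
    (hkall : (key ++ ['=']).all (fun x => !PySem.Chars.isspace x))
    (hpre : (key ++ ['=']) <+: (c :: cs)) :
    pvVal ((c :: cs).drop (key.length + 1)) =
      (PySem.Chars.splitOn ((c :: cs).takeWhile (fun x => !PySem.Chars.isspace x)) ['=']).getD 1 [] := by
  have hkt : (key ++ ['=']) <+: (c :: cs).takeWhile (fun x => !PySem.Chars.isspace x) :=
    pvPrefix_takeWhile _ _ hkall hpre
  have hlen : key.length + 1 ≤ ((c :: cs).takeWhile (fun x => !PySem.Chars.isspace x)).length := by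
    have := hkt.length_le; simp at this; omega
  obtain ⟨u, hu⟩ := hkt
  rw [pvVal_eq (c :: cs) (key.length + 1) hlen, ← hu]
  have hdrop : ((key ++ ['=']) ++ u).drop (key.length + 1) = u := by
    have h : (key ++ ['=']).length = key.length + 1 := by simp
    rw [← h, List.drop_left]
  have happ : (key ++ ['=']) ++ u = key ++ '=' :: u := by simp
  rw [hdrop, happ, pvSplit1 key u hkeq]

theorem pvBranch (key : List Char) (out : String) (c : Char) (cs : List Char)
    (d : PySem.Dict String String) (n : ℕ)
    (hc : ¬ PySem.Chars.isspace c = true)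
    (hkeq : '=' ∉ key) (hkall : (key ++ ['=']).all (fun x => !PySem.Chars.isspace x))
    (hpre : PySem.Chars.startswith (c :: cs) (key ++ ['=']) = true)
    (hrlen : (cs.dropWhile (fun x => !PySem.Chars.isspace x)).length ≤ n)
    (ihn : ∀ s : List Char, s.length ≤ n → ∀ d : PySem.Dict String String,
      pvScan s true d = (pvWords s).foldl pvStepA d)
    (hstep : pvStepA d ((c :: cs).takeWhile (fun x => !PySem.Chars.isspace x)) =
      d.insert out (String.mk (PySem.Chars.stripChars
        ((PySem.Chars.splitOn ((c :: cs).takeWhile (fun x => !PySem.Chars.isspace x)) ['=']).getD 1 [])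
        ['\'']))) :
    pvScan ((c :: cs).drop ((key.length + 1) + (pvVal ((c :: cs).drop (key.length + 1))).length)) false
        (d.insert out (String.mk (PySem.Chars.stripChars (pvVal ((c :: cs).drop (key.length + 1))) ['\'']))) =
      (pvWords (c :: cs)).foldl pvStepA d := by
  have hpre' : (key ++ ['=']) <+: (c :: cs) := (PySem.Chars.startswith_iff _ _).mp hpre
  have hkt : (key ++ ['=']) <+: (c :: cs).takeWhile (fun x => !PySem.Chars.isspace x) :=
    pvPrefix_takeWhile _ _ hkall hpre'
  have hklen : key.length + 1 ≤ ((c :: cs).takeWhile (fun x => !PySem.Chars.isspace x)).length := by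
    have := hkt.length_le; simp at this; omega
  rw [pvScan_false, pvRest_eq (c :: cs) (key.length + 1) hklen,
    List.dropWhile_cons_of_pos (by simp [hc]), ihn _ hrlen]
  rw [pvWords, if_neg hc, List.foldl_cons,
    ← List.takeWhile_cons_of_pos (p := fun x => !PySem.Chars.isspace x)
      (by simp [hc] : (!PySem.Chars.isspace c) = true)]
  rw [hstep, pvVal_token key c cs hkeq hkall hpre']

theorem pvScanAux : ∀ (n : ℕ) (s : List Char), s.length ≤ n → ∀ (d : PySem.Dict String String),
    pvScan s true d = (pvWords s).foldl pvStepA d := by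
  intro n
  induction n with
  | zero =>
    intro s hs d
    have : s = [] := List.eq_nil_of_length_eq_zero (Nat.le_zero.mp hs)
    subst this
    simp [pvScan, pvWords]
  | succ n ih =>
    intro s hs d
    cases s with
    | nil => simp [pvScan, pvWords]
    | cons c cs =>
      by_cases hc : PySem.Chars.isspace c = true
      · rw [pvScan, if_pos hc, pvWords, if_pos hc]
        exact ih cs (by simpa using hs) d
      · have hrlen : (cs.dropWhile (fun x => !PySem.Chars.isspace x)).length ≤ n :=
          le_trans (List.length_dropWhile_le _ _) (by simpa using hs)
        rw [pvScan, if_neg hc]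
        simp only [Bool.true_and]
        by_cases h1 : PySem.Chars.startswith (c :: cs) ("versionName=".toList) = true
        · rw [if_pos h1]
          have hk : ("versionName=".toList : List Char) = "versionName".toList ++ ['='] := by decide
          have hpre : PySem.Chars.startswith (c :: cs) ("versionName".toList ++ ['=']) = true := by
            rw [← hk]; exact h1
          have hstep : pvStepA d ((c :: cs).takeWhile (fun x => !PySem.Chars.isspace x)) =
              d.insert "version_name" (String.mk (PySem.Chars.stripChars
                ((PySem.Chars.splitOn ((c :: cs).takeWhile (fun x => !PySem.Chars.isspace x)) ['=']).getD 1 [])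
                ['\''])) := by
            have hv : PySem.Chars.startswith ((c :: cs).takeWhile (fun x => !PySem.Chars.isspace x))
                ("versionName=".toList) = true :=
              pvStart_token_true _ c cs (by decide) h1
            have hn : PySem.Chars.startswith ((c :: cs).takeWhile (fun x => !PySem.Chars.isspace x))
                ("name=".toList) = false := by
              apply pvStart_false
              intro hpn
              rcases List.prefix_or_prefix_of_prefix hpn ((PySem.Chars.startswith_iff _ _).mp hv) with h | h
              · exact absurd h (by decide)
              · exact absurd h (by decide)
            unfold pvStepA
            rw [if_neg (by simp only [hn]; decide), if_pos hv]
          have hb := pvBranch "versionName".toList "version_name" c cs d n hc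
            (by decide) (by decide) hpre hrlen ih hstep
          have e1 : ("versionName".toList : List Char).length = 11 := by decide
          rw [e1] at hb
          exact hb
        · rw [if_neg h1]
          by_cases h2 : PySem.Chars.startswith (c :: cs) ("versionCode=".toList) = true
          · rw [if_pos h2]
            have hk : ("versionCode=".toList : List Char) = "versionCode".toList ++ ['='] := by decide
            have hpre : PySem.Chars.startswith (c :: cs) ("versionCode".toList ++ ['=']) = true := by
              rw [← hk]; exact h2
            have hstep : pvStepA d ((c :: cs).takeWhile (fun x => !PySem.Chars.isspace x)) =
                d.insert "version_code" (String.mk (PySem.Chars.stripChars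
                  ((PySem.Chars.splitOn ((c :: cs).takeWhile (fun x => !PySem.Chars.isspace x)) ['=']).getD 1 [])
                  ['\''])) := by
              have hv : PySem.Chars.startswith ((c :: cs).takeWhile (fun x => !PySem.Chars.isspace x))
                  ("versionCode=".toList) = true :=
                pvStart_token_true _ c cs (by decide) h2
              have hn : PySem.Chars.startswith ((c :: cs).takeWhile (fun x => !PySem.Chars.isspace x))
                  ("name=".toList) = false := by
                apply pvStart_false
                intro hpn
                rcases List.prefix_or_prefix_of_prefix hpn ((PySem.Chars.startswith_iff _ _).mp hv) with h | h
                · exact absurd h (by decide)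
                · exact absurd h (by decide)
              have hvn : PySem.Chars.startswith ((c :: cs).takeWhile (fun x => !PySem.Chars.isspace x))
                  ("versionName=".toList) = false := pvStart_token_false _ c cs h1
              unfold pvStepA
              rw [if_neg (by simp only [hn]; decide), if_neg (by simp only [hvn]; decide), if_pos hv]
            have hb := pvBranch "versionCode".toList "version_code" c cs d n hc
              (by decide) (by decide) hpre hrlen ih hstep
            have e1 : ("versionCode".toList : List Char).length = 11 := by decide
            rw [e1] at hb
            exact hb
          · rw [if_neg h2]
            by_cases h3 : PySem.Chars.startswith (c :: cs) ("name=".toList) = true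
            · rw [if_pos h3]
              have hk : ("name=".toList : List Char) = "name".toList ++ ['='] := by decide
              have hpre : PySem.Chars.startswith (c :: cs) ("name".toList ++ ['=']) = true := by
                rw [← hk]; exact h3
              have hstep : pvStepA d ((c :: cs).takeWhile (fun x => !PySem.Chars.isspace x)) =
                  d.insert "package_name" (String.mk (PySem.Chars.stripChars
                    ((PySem.Chars.splitOn ((c :: cs).takeWhile (fun x => !PySem.Chars.isspace x)) ['=']).getD 1 [])
                    ['\''])) := by
                have hv : PySem.Chars.startswith ((c :: cs).takeWhile (fun x => !PySem.Chars.isspace x))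
                    ("name=".toList) = true :=
                  pvStart_token_true _ c cs (by decide) h3
                unfold pvStepA
                rw [if_pos hv]
              have hb := pvBranch "name".toList "package_name" c cs d n hc
                (by decide) (by decide) hpre hrlen ih hstep
              have e1 : ("name".toList : List Char).length = 4 := by decide
              rw [e1] at hb
              exact hb
            · rw [if_neg h3]
              have hstep0 : pvStepA d ((c :: cs).takeWhile (fun x => !PySem.Chars.isspace x)) = d := by
                unfold pvStepA
                rw [if_neg (by simp only [pvStart_token_false _ c cs h3]; decide),
                  if_neg (by simp only [pvStart_token_false _ c cs h1]; decide),
                  if_neg (by simp only [pvStart_token_false _ c cs h2]; decide)]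
              rw [pvScan_false, ih _ hrlen, pvWords, if_neg hc, List.foldl_cons,
                ← List.takeWhile_cons_of_pos (p := fun x => !PySem.Chars.isspace x)
                  (by simp [hc] : (!PySem.Chars.isspace c) = true), hstep0]

theorem pvScan_true_eq_foldl (s : List Char) (d : PySem.Dict String String) :
    pvScan s true d = (pvWords s).foldl pvStepA d :=
  pvScanAux s.length s le_rfl d

-- ===== VERDICT (by name: the statement is the Claim_ definition above) =====
theorem parse_aapt_output_py_spec : Claim_equal_parse_aapt_output_py := by
  intro output _
  unfold Spec_parse_aapt_output_py parse_aapt_output_py parse_aapt_output_py_alt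
  have h : ∀ d line, pvLineA d line = pvLineB d line := by
    intro d line
    unfold pvLineA pvLineB
    rw [pvWords_eq_split₀, pvScan_true_eq_foldl]
  rw [funext fun d => funext fun line => h d line]
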